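-- pv_equiv track=rewrite | github.com/Hydraallen/AI_IDE_Crawl | compare_script/analyze_changes.py | categorize_url
-- ===== SOURCE A (Python) =====
-- def categorize_url(url):
--     """Categorize URL by type."""
--     url_lower = url.lower()
--
--     if any(x in url_lower for x in ['.js', '.css', '.woff', '.ttf', 'assets/', 'static/']):
--         return 'static_asset'
--     elif any(x in url_lower for x in ['.png', '.jpg', '.jpeg', '.gif', '.svg', '.webp', '.ico']):
--         return 'image'
--     elif any(x in url_lower for x in ['api/', '/api/', 'json?', '.json']):
--         return 'api'
--     elif any(x in url_lower for x in ['youtube.com', 'vimeo.com', 'video']):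
--         return 'video_embed'
--     elif any(x in url_lower for x in ['analytics', 'tracking', 'pixel', 'ads', 'gtm', 'gtag']):
--         return 'tracking'
--     elif any(x in url_lower for x in ['auth', 'login', 'signin', 'oauth', 'account']):
--         return 'auth'
--     else:
--         return 'page'
-- ===== SOURCE B (Python) =====
-- LABELS = ['static_asset', 'image', 'api', 'video_embed', 'tracking', 'auth']
--
-- PATTERNS = [
--     ('.js', 0), ('.css', 0), ('.woff', 0), ('.ttf', 0), ('assets/', 0), ('static/', 0),
--     ('.png', 1), ('.jpg', 1), ('.jpeg', 1), ('.gif', 1), ('.svg', 1), ('.webp', 1), ('.ico', 1),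
--     ('api/', 2), ('/api/', 2), ('json?', 2), ('.json', 2),
--     ('youtube.com', 3), ('vimeo.com', 3), ('video', 3),
--     ('analytics', 4), ('tracking', 4), ('pixel', 4), ('ads', 4), ('gtm', 4), ('gtag', 4),
--     ('auth', 5), ('login', 5), ('signin', 5), ('oauth', 5), ('account', 5),
-- ]
--
-- # one-level trie: patterns grouped by their first character
-- DISPATCH = {}
-- for _pat, _pr in PATTERNS:
--     DISPATCH.setdefault(_pat[0], []).append((_pat, _pr))
--
-- def categorize_url(url):
--     """Categorize URL by type: single position scan with a first-char dispatch
--     table, accumulating the minimum matching priority."""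
--     u = url.lower()
--     best = 6
--     for i, c in enumerate(u):
--         for pat, pr in DISPATCH.get(c, ()):
--             if pr < best and u.startswith(pat, i):
--                 best = pr
--     return LABELS[best] if best < 6 else 'page'
-- ===== Notes on version B (the rewrite author's own statement) =====
-- stated objective: alternative
-- what changed: Replaces A's pattern-major if/elif cascade of whole-string substring tests with a single position-major scan of the lowercased URL: a one-level trie (first-character dispatch table over a flat (pattern, priority) list) selects the few candidate patterns at each index, and the minimum matching priority is accumulated and finally mapped to its label (6 = 'page').
import Mathlib
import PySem

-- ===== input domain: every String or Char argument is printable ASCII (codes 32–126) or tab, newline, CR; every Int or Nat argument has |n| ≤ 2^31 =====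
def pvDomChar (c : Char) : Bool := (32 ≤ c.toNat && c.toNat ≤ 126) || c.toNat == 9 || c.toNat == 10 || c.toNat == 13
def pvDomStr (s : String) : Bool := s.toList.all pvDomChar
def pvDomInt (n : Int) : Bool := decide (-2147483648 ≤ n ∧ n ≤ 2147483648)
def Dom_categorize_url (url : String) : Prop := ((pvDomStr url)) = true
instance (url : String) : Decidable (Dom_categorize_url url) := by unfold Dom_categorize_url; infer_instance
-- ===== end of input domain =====

-- B replaces A's pattern-major if/elif cascade of substring tests with a single
-- position-major scan of the lowercased URL that accumulates the minimum matching
-- priority (objective: alternative algorithm, same asymptotic cost).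

-- ===== PORT A =====
def categorize_url (url : String) : String :=
  let url_lower := PySem.Str.lower url
  if [".js", ".css", ".woff", ".ttf", "assets/", "static/"].any (fun x => PySem.Str.isIn x url_lower) then "static_asset"
  else if [".png", ".jpg", ".jpeg", ".gif", ".svg", ".webp", ".ico"].any (fun x => PySem.Str.isIn x url_lower) then "image"
  else if ["api/", "/api/", "json?", ".json"].any (fun x => PySem.Str.isIn x url_lower) then "api"
  else if ["youtube.com", "vimeo.com", "video"].any (fun x => PySem.Str.isIn x url_lower) then "video_embed"
  else if ["analytics", "tracking", "pixel", "ads", "gtm", "gtag"].any (fun x => PySem.Str.isIn x url_lower) then "tracking"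
  else if ["auth", "login", "signin", "oauth", "account"].any (fun x => PySem.Str.isIn x url_lower) then "auth"
  else "page"

-- ===== PORT B =====
def catLabels : List String :=
  ["static_asset", "image", "api", "video_embed", "tracking", "auth"]

-- DISPATCH of Source B, a module-level constant: patterns grouped by first character
-- (one-level trie), each bucket in PATTERNS order; ported as a function on the char.
def catDispatch (c : Char) : List (String × Nat) :=
  if c = '.' then [(".js", 0), (".css", 0), (".woff", 0), (".ttf", 0), (".png", 1), (".jpg", 1), (".jpeg", 1), (".gif", 1), (".svg", 1), (".webp", 1), (".ico", 1), (".json", 2)]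
  else if c = 'a' then [("assets/", 0), ("api/", 2), ("analytics", 4), ("ads", 4), ("auth", 5), ("account", 5)]
  else if c = 's' then [("static/", 0), ("signin", 5)]
  else if c = '/' then [("/api/", 2)]
  else if c = 'j' then [("json?", 2)]
  else if c = 'y' then [("youtube.com", 3)]
  else if c = 'v' then [("vimeo.com", 3), ("video", 3)]
  else if c = 't' then [("tracking", 4)]
  else if c = 'p' then [("pixel", 4)]
  else if c = 'g' then [("gtm", 4), ("gtag", 4)]
  else if c = 'l' then [("login", 5)]
  else if c = 'o' then [("oauth", 5)]
  else []

-- inner loop of Source B at one position: only the bucket of the current character is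
-- tried; `u.startswith(pat, i)` with 0 ≤ i ≤ len(u) is exactly a prefix test on the
-- suffix u[i:], ported as Chars.startswith on the drop (s is the whole suffix c::rest).
def scanStep (c : Char) (s : List Char) (b : Nat) : Nat :=
  (catDispatch c).foldl (fun b pp => if pp.2 < b && PySem.Chars.startswith s pp.1.toList then pp.2 else b) b

-- outer loop of Source B: i = 0 .. len(u)-1, i.e. one step per nonempty suffix of u.
def scanPos : List Char → Nat → Nat
  | [], b => b
  | c :: rest, b => scanPos rest (scanStep c (c :: rest) b)

def categorize_url_alt (url : String) : String :=
  let u := (PySem.Str.lower url).toList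
  let best := scanPos u 6
  if best < 6 then catLabels.getD best "page" else "page"

-- ===== PRECONDITION & SPEC =====
def Spec_categorize_url (url : String) (out : String) : Prop := out = categorize_url_alt url
instance (url : String) (out : String) : Decidable (Spec_categorize_url url out) := by unfold Spec_categorize_url; infer_instance

-- ===== CLAIM (what is proved, stated in full; the proofs are below) =====
def Claim_equal_categorize_url : Prop := ∀ (url : String), Dom_categorize_url url → Spec_categorize_url url (categorize_url url)

-- ===== LEMMAS AND PROOFS =====

-- the flat PATTERNS table of Source B (used only to state the invariants; B itself
-- reads it through catDispatch)
def catPats : List (String × Nat) :=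
  [(".js", 0), (".css", 0), (".woff", 0), (".ttf", 0), ("assets/", 0), ("static/", 0),
   (".png", 1), (".jpg", 1), (".jpeg", 1), (".gif", 1), (".svg", 1), (".webp", 1), (".ico", 1),
   ("api/", 2), ("/api/", 2), ("json?", 2), (".json", 2),
   ("youtube.com", 3), ("vimeo.com", 3), ("video", 3),
   ("analytics", 4), ("tracking", 4), ("pixel", 4), ("ads", 4), ("gtm", 4), ("gtag", 4),
   ("auth", 5), ("login", 5), ("signin", 5), ("oauth", 5), ("account", 5)]

-- generic: the fold of Source B's inner loop computes min of b and the matching priorities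
theorem foldl_min_spec (L : List (String × Nat)) (s : List Char) (b : Nat) :
    L.foldl (fun b pp => if pp.2 < b && PySem.Chars.startswith s pp.1.toList then pp.2 else b) b ≤ b ∧
    (∀ pp ∈ L, PySem.Chars.startswith s pp.1.toList = true →
      L.foldl (fun b pp => if pp.2 < b && PySem.Chars.startswith s pp.1.toList then pp.2 else b) b ≤ pp.2) ∧
    (L.foldl (fun b pp => if pp.2 < b && PySem.Chars.startswith s pp.1.toList then pp.2 else b) b = b ∨
      ∃ pp ∈ L, PySem.Chars.startswith s pp.1.toList = true ∧
        L.foldl (fun b pp => if pp.2 < b && PySem.Chars.startswith s pp.1.toList then pp.2 else b) b = pp.2) := by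
  induction L generalizing b with
  | nil => simp
  | cons pp0 rest ih =>
    simp only [List.foldl_cons]
    by_cases hcond : (decide (pp0.2 < b) && PySem.Chars.startswith s pp0.1.toList) = true
    · rw [if_pos hcond]
      obtain ⟨hlt', hsw⟩ := Bool.and_eq_true_iff.mp hcond
      have hlt : pp0.2 < b := of_decide_eq_true hlt'
      obtain ⟨ih1, ih2, ih3⟩ := ih pp0.2
      refine ⟨le_trans ih1 (le_of_lt hlt), ?_, ?_⟩
      · intro pp hpp hm
        rcases List.mem_cons.mp hpp with heq | hmem
        · exact heq ▸ ih1
        · exact ih2 pp hmem hm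
      · rcases ih3 with h3 | ⟨pp, hpp, hm, he⟩
        · exact Or.inr ⟨pp0, List.mem_cons_self, hsw, h3⟩
        · exact Or.inr ⟨pp, List.mem_cons_of_mem _ hpp, hm, he⟩
    · rw [if_neg hcond]
      obtain ⟨ih1, ih2, ih3⟩ := ih b
      refine ⟨ih1, ?_, ?_⟩
      · intro pp hpp hm
        rcases List.mem_cons.mp hpp with heq | hmem
        · subst heq
          have hnlt : ¬ pp.2 < b := by
            intro hlt
            exact hcond (by simp [hlt, hm])
          exact le_trans ih1 (by omega)
        · exact ih2 pp hmem hm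
      · rcases ih3 with h3 | ⟨pp, hpp, hm, he⟩
        · exact Or.inl h3
        · exact Or.inr ⟨pp, List.mem_cons_of_mem _ hpp, hm, he⟩

theorem catPats_fst_ne_nil' : ∀ pp ∈ catPats, pp.1.toList ≠ [] := by decide

-- every dispatch bucket is part of the flat table
set_option maxHeartbeats 2000000 in
theorem dispatch_sub (c : Char) (pp : String × Nat) (h : pp ∈ catDispatch c) : pp ∈ catPats := by
  unfold catDispatch at h
  split_ifs at h <;> (fin_cases h <;> decide)

-- every table entry is in the bucket of its first character
theorem catPats_mem_dispatch : ∀ pp ∈ catPats, pp ∈ catDispatch (pp.1.toList.headD 'x') := by decide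

-- a pattern that matches at a suffix c :: rest lies in the bucket of c
theorem mem_dispatch_of_startswith (c : Char) (rest : List Char) (pp : String × Nat)
    (hpp : pp ∈ catPats) (hm : PySem.Chars.startswith (c :: rest) pp.1.toList = true) :
    pp ∈ catDispatch c := by
  have hpre := (PySem.Chars.startswith_iff _ _).mp hm
  obtain ⟨x, t, hxt⟩ := List.exists_cons_of_ne_nil (catPats_fst_ne_nil' pp hpp)
  have hx : x = c := by
    rw [hxt] at hpre
    obtain ⟨l, hl⟩ := hpre
    simpa using congrArg List.head? hl
  have hmem := catPats_mem_dispatch pp hpp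
  rw [hxt] at hmem
  simpa [hx] using hmem

-- scanStep b = min of b and the priorities of the table patterns matching at this suffix
theorem scanStep_spec (c : Char) (rest : List Char) (b : Nat) :
    scanStep c (c :: rest) b ≤ b ∧
    (∀ pp ∈ catPats, PySem.Chars.startswith (c :: rest) pp.1.toList = true → scanStep c (c :: rest) b ≤ pp.2) ∧
    (scanStep c (c :: rest) b = b ∨ ∃ pp ∈ catPats, PySem.Chars.startswith (c :: rest) pp.1.toList = true ∧ scanStep c (c :: rest) b = pp.2) := by
  obtain ⟨f1, f2, f3⟩ := foldl_min_spec (catDispatch c) (c :: rest) b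
  refine ⟨f1, ?_, ?_⟩
  · intro pp hpp hm
    exact f2 pp (mem_dispatch_of_startswith c rest pp hpp hm) hm
  · rcases f3 with h3 | ⟨pp, hpp, hm, he⟩
    · exact Or.inl h3
    · exact Or.inr ⟨pp, dispatch_sub c pp hpp, hm, he⟩

-- scanPos b = min of b and the priorities of patterns matching at some visited suffix
theorem scanPos_spec (s : List Char) (b : Nat) :
    scanPos s b ≤ b ∧
    (∀ pp ∈ catPats, ∀ j, j < s.length → PySem.Chars.startswith (s.drop j) pp.1.toList = true → scanPos s b ≤ pp.2) ∧
    (scanPos s b = b ∨ ∃ pp ∈ catPats, (∃ j, PySem.Chars.startswith (s.drop j) pp.1.toList = true) ∧ scanPos s b = pp.2) := by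
  induction s generalizing b with
  | nil => simp [scanPos]
  | cons c rest ih =>
    obtain ⟨st1, st2, st3⟩ := scanStep_spec c rest b
    obtain ⟨ih1, ih2, ih3⟩ := ih (scanStep c (c :: rest) b)
    refine ⟨le_trans ih1 st1, ?_, ?_⟩
    · intro pp hpp j hj hm
      match j with
      | 0 => exact le_trans ih1 (st2 pp hpp (by simpa using hm))
      | j' + 1 =>
        exact ih2 pp hpp j' (by simpa using hj) (by simpa using hm)
    · rcases ih3 with h3 | ⟨pp, hpp, ⟨j, hm⟩, he⟩
      · rw [scanPos, h3]
        rcases st3 with h4 | ⟨pp, hpp, hm, he⟩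
        · exact Or.inl h4
        · exact Or.inr ⟨pp, hpp, ⟨0, by simpa using hm⟩, he⟩
      · exact Or.inr ⟨pp, hpp, ⟨j + 1, by simpa using hm⟩, by rw [scanPos]; exact he⟩

theorem catPats_fst_ne_nil : ∀ pp ∈ catPats, pp.1.toList ≠ [] := by decide

-- bridge: a pattern matches at some visited position iff it occurs as a substring
theorem match_iff_isIn (pp : String × Nat) (hpp : pp ∈ catPats) (u : List Char) :
    (∃ j, j < u.length ∧ PySem.Chars.startswith (u.drop j) pp.1.toList = true) ↔
      PySem.Chars.isIn pp.1.toList u = true := by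
  rw [← PySem.Chars.exists_prefix_drop_iff_isIn]
  constructor
  · rintro ⟨j, _, hm⟩
    exact ⟨j, (PySem.Chars.startswith_iff _ _).mp hm⟩
  · rintro ⟨j, hpre⟩
    refine ⟨j, ?_, (PySem.Chars.startswith_iff _ _).mpr hpre⟩
    by_contra hj
    have : u.drop j = [] := List.drop_eq_nil_of_le (by omega)
    rw [this] at hpre
    exact catPats_fst_ne_nil pp hpp (List.prefix_nil.mp hpre)

-- the scan computes the least priority whose pattern occurs in u (6 if none)
theorem scanPos_eq (u : List Char) (g : Nat) (hg : g ≤ 6)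
    (hyes : g = 6 ∨ ∃ pp ∈ catPats, pp.2 = g ∧ PySem.Chars.isIn pp.1.toList u = true)
    (hno : ∀ pp ∈ catPats, pp.2 < g → PySem.Chars.isIn pp.1.toList u = false) :
    scanPos u 6 = g := by
  obtain ⟨h1, h2, h3⟩ := scanPos_spec u 6
  have hub : scanPos u 6 ≤ g := by
    rcases hyes with rfl | ⟨pp, hpp, hpr, hin⟩
    · exact h1
    · obtain ⟨j, hj, hm⟩ := (match_iff_isIn pp hpp u).mpr hin
      exact hpr ▸ h2 pp hpp j hj hm
  have hlb : ¬ scanPos u 6 < g := by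
    intro hlt
    rcases h3 with he | ⟨pp, hpp, ⟨j, hm⟩, he⟩
    · omega
    · have hj : j < u.length := by
        by_contra hj
        have : u.drop j = [] := List.drop_eq_nil_of_le (by omega)
        rw [this] at hm
        exact catPats_fst_ne_nil pp hpp
          (List.prefix_nil.mp ((PySem.Chars.startswith_iff _ _).mp hm))
      have hin := (match_iff_isIn pp hpp u).mp ⟨j, hj, hm⟩
      rw [hno pp hpp (he ▸ hlt)] at hin
      exact absurd hin (by simp)
  omega

-- membership facts relating A's six literal groups to the flat table (by computation)
theorem catPats_split : ∀ pp ∈ catPats,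
    (pp.2 = 0 ∧ pp.1 ∈ [".js", ".css", ".woff", ".ttf", "assets/", "static/"]) ∨
    (pp.2 = 1 ∧ pp.1 ∈ [".png", ".jpg", ".jpeg", ".gif", ".svg", ".webp", ".ico"]) ∨
    (pp.2 = 2 ∧ pp.1 ∈ ["api/", "/api/", "json?", ".json"]) ∨
    (pp.2 = 3 ∧ pp.1 ∈ ["youtube.com", "vimeo.com", "video"]) ∨
    (pp.2 = 4 ∧ pp.1 ∈ ["analytics", "tracking", "pixel", "ads", "gtm", "gtag"]) ∨
    (pp.2 = 5 ∧ pp.1 ∈ ["auth", "login", "signin", "oauth", "account"]) := by decide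

theorem group_sub_catPats :
    (∀ x ∈ [".js", ".css", ".woff", ".ttf", "assets/", "static/"], (x, 0) ∈ catPats) ∧
    (∀ x ∈ [".png", ".jpg", ".jpeg", ".gif", ".svg", ".webp", ".ico"], (x, 1) ∈ catPats) ∧
    (∀ x ∈ ["api/", "/api/", "json?", ".json"], (x, 2) ∈ catPats) ∧
    (∀ x ∈ ["youtube.com", "vimeo.com", "video"], (x, 3) ∈ catPats) ∧
    (∀ x ∈ ["analytics", "tracking", "pixel", "ads", "gtm", "gtag"], (x, 4) ∈ catPats) ∧
    (∀ x ∈ ["auth", "login", "signin", "oauth", "account"], (x, 5) ∈ catPats) := by decide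

-- ===== VERDICT (by name: the statement is the Claim_ definition above) =====
theorem categorize_url_spec : Claim_equal_categorize_url := by
  intro url _
  unfold Spec_categorize_url categorize_url categorize_url_alt
  simp only [PySem.Str.isIn_eq]
  set u := (PySem.Str.lower url).toList with hu
  obtain ⟨hs0, hs1, hs2, hs3, hs4, hs5⟩ := group_sub_catPats
  -- helper to produce hyes from a true group-any and hno from false lower group-anys
  have mkyes : ∀ (g : Nat) (G : List String), (∀ x ∈ G, (x, g) ∈ catPats) →
      G.any (fun x => PySem.Chars.isIn x.toList u) = true →
      ∃ pp ∈ catPats, pp.2 = g ∧ PySem.Chars.isIn pp.1.toList u = true := by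
    intro g G hG hany
    obtain ⟨x, hx, hin⟩ := List.any_eq_true.mp hany
    exact ⟨(x, g), hG x hx, rfl, hin⟩
  by_cases h0 : [".js", ".css", ".woff", ".ttf", "assets/", "static/"].any (fun x => PySem.Chars.isIn x.toList u) = true
  · rw [if_pos h0, scanPos_eq u 0 (by omega) (Or.inr (mkyes 0 _ hs0 h0)) (by intro pp _ h; omega)]
    rfl
  all_goals rw [if_neg h0]
  all_goals by_cases h1 : [".png", ".jpg", ".jpeg", ".gif", ".svg", ".webp", ".ico"].any (fun x => PySem.Chars.isIn x.toList u) = true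
  case pos =>
    have hno : ∀ pp ∈ catPats, pp.2 < 1 → PySem.Chars.isIn pp.1.toList u = false := by
      intro pp hpp hlt
      rcases catPats_split pp hpp with ⟨_, hm⟩ | ⟨hp, _⟩ | ⟨hp, _⟩ | ⟨hp, _⟩ | ⟨hp, _⟩ | ⟨hp, _⟩
      · exact Bool.not_eq_true _ ▸ (fun hc => h0 (List.any_eq_true.mpr ⟨pp.1, hm, hc⟩))
      all_goals omega
    rw [if_pos h1, scanPos_eq u 1 (by omega) (Or.inr (mkyes 1 _ hs1 h1)) hno]
    rfl
  all_goals rw [if_neg h1]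
  all_goals by_cases h2 : ["api/", "/api/", "json?", ".json"].any (fun x => PySem.Chars.isIn x.toList u) = true
  case pos =>
    have hno : ∀ pp ∈ catPats, pp.2 < 2 → PySem.Chars.isIn pp.1.toList u = false := by
      intro pp hpp hlt
      rcases catPats_split pp hpp with ⟨_, hm⟩ | ⟨_, hm⟩ | ⟨hp, _⟩ | ⟨hp, _⟩ | ⟨hp, _⟩ | ⟨hp, _⟩
      · exact Bool.not_eq_true _ ▸ (fun hc => h0 (List.any_eq_true.mpr ⟨pp.1, hm, hc⟩))
      · exact Bool.not_eq_true _ ▸ (fun hc => h1 (List.any_eq_true.mpr ⟨pp.1, hm, hc⟩))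
      all_goals omega
    rw [if_pos h2, scanPos_eq u 2 (by omega) (Or.inr (mkyes 2 _ hs2 h2)) hno]
    rfl
  all_goals rw [if_neg h2]
  all_goals by_cases h3 : ["youtube.com", "vimeo.com", "video"].any (fun x => PySem.Chars.isIn x.toList u) = true
  case pos =>
    have hno : ∀ pp ∈ catPats, pp.2 < 3 → PySem.Chars.isIn pp.1.toList u = false := by
      intro pp hpp hlt
      rcases catPats_split pp hpp with ⟨_, hm⟩ | ⟨_, hm⟩ | ⟨_, hm⟩ | ⟨hp, _⟩ | ⟨hp, _⟩ | ⟨hp, _⟩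
      · exact Bool.not_eq_true _ ▸ (fun hc => h0 (List.any_eq_true.mpr ⟨pp.1, hm, hc⟩))
      · exact Bool.not_eq_true _ ▸ (fun hc => h1 (List.any_eq_true.mpr ⟨pp.1, hm, hc⟩))
      · exact Bool.not_eq_true _ ▸ (fun hc => h2 (List.any_eq_true.mpr ⟨pp.1, hm, hc⟩))
      all_goals omega
    rw [if_pos h3, scanPos_eq u 3 (by omega) (Or.inr (mkyes 3 _ hs3 h3)) hno]
    rfl
  all_goals rw [if_neg h3]
  all_goals by_cases h4 : ["analytics", "tracking", "pixel", "ads", "gtm", "gtag"].any (fun x => PySem.Chars.isIn x.toList u) = true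
  case pos =>
    have hno : ∀ pp ∈ catPats, pp.2 < 4 → PySem.Chars.isIn pp.1.toList u = false := by
      intro pp hpp hlt
      rcases catPats_split pp hpp with ⟨_, hm⟩ | ⟨_, hm⟩ | ⟨_, hm⟩ | ⟨_, hm⟩ | ⟨hp, _⟩ | ⟨hp, _⟩
      · exact Bool.not_eq_true _ ▸ (fun hc => h0 (List.any_eq_true.mpr ⟨pp.1, hm, hc⟩))
      · exact Bool.not_eq_true _ ▸ (fun hc => h1 (List.any_eq_true.mpr ⟨pp.1, hm, hc⟩))
      · exact Bool.not_eq_true _ ▸ (fun hc => h2 (List.any_eq_true.mpr ⟨pp.1, hm, hc⟩))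
      · exact Bool.not_eq_true _ ▸ (fun hc => h3 (List.any_eq_true.mpr ⟨pp.1, hm, hc⟩))
      all_goals omega
    rw [if_pos h4, scanPos_eq u 4 (by omega) (Or.inr (mkyes 4 _ hs4 h4)) hno]
    rfl
  all_goals rw [if_neg h4]
  all_goals by_cases h5 : ["auth", "login", "signin", "oauth", "account"].any (fun x => PySem.Chars.isIn x.toList u) = true
  case pos =>
    have hno : ∀ pp ∈ catPats, pp.2 < 5 → PySem.Chars.isIn pp.1.toList u = false := by
      intro pp hpp hlt
      rcases catPats_split pp hpp with ⟨_, hm⟩ | ⟨_, hm⟩ | ⟨_, hm⟩ | ⟨_, hm⟩ | ⟨_, hm⟩ | ⟨hp, _⟩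
      · exact Bool.not_eq_true _ ▸ (fun hc => h0 (List.any_eq_true.mpr ⟨pp.1, hm, hc⟩))
      · exact Bool.not_eq_true _ ▸ (fun hc => h1 (List.any_eq_true.mpr ⟨pp.1, hm, hc⟩))
      · exact Bool.not_eq_true _ ▸ (fun hc => h2 (List.any_eq_true.mpr ⟨pp.1, hm, hc⟩))
      · exact Bool.not_eq_true _ ▸ (fun hc => h3 (List.any_eq_true.mpr ⟨pp.1, hm, hc⟩))
      · exact Bool.not_eq_true _ ▸ (fun hc => h4 (List.any_eq_true.mpr ⟨pp.1, hm, hc⟩))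
      all_goals omega
    rw [if_pos h5, scanPos_eq u 5 (by omega) (Or.inr (mkyes 5 _ hs5 h5)) hno]
    rfl
  case neg =>
    have hno : ∀ pp ∈ catPats, pp.2 < 6 → PySem.Chars.isIn pp.1.toList u = false := by
      intro pp hpp _
      rcases catPats_split pp hpp with ⟨_, hm⟩ | ⟨_, hm⟩ | ⟨_, hm⟩ | ⟨_, hm⟩ | ⟨_, hm⟩ | ⟨_, hm⟩
      · exact Bool.not_eq_true _ ▸ (fun hc => h0 (List.any_eq_true.mpr ⟨pp.1, hm, hc⟩))
      · exact Bool.not_eq_true _ ▸ (fun hc => h1 (List.any_eq_true.mpr ⟨pp.1, hm, hc⟩))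
      · exact Bool.not_eq_true _ ▸ (fun hc => h2 (List.any_eq_true.mpr ⟨pp.1, hm, hc⟩))
      · exact Bool.not_eq_true _ ▸ (fun hc => h3 (List.any_eq_true.mpr ⟨pp.1, hm, hc⟩))
      · exact Bool.not_eq_true _ ▸ (fun hc => h4 (List.any_eq_true.mpr ⟨pp.1, hm, hc⟩))
      · exact Bool.not_eq_true _ ▸ (fun hc => h5 (List.any_eq_true.mpr ⟨pp.1, hm, hc⟩))
    rw [if_neg h5, scanPos_eq u 6 (by omega) (Or.inl rfl) hno]
    rfl
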